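-- pv_equiv track=rewrite | github.com/bissli/memman | src/memman/setup/settings.py | strip_json5
-- ===== SOURCE A (Python) =====
-- def strip_json5(s: str) -> str:
--     """Remove // line comments and trailing commas from JSON5 input."""
--     result = []
--     in_string = False
--     escaped = False
--     i = 0
--     while i < len(s):
--         ch = s[i]
--         if escaped:
--             result.append(ch)
--             escaped = False
--             i += 1
--             continue
--         if in_string:
--             if ch == '\\':
--                 escaped = True
--             elif ch == '"':
--                 in_string = False
--             result.append(ch)
--             i += 1
--             continue
--         if ch == '"':
--             in_string = True
--             result.append(ch)
--             i += 1
--             continue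
--         if ch == '/' and i + 1 < len(s) and s[i + 1] == '/':
--             while i < len(s) and s[i] != '\n':
--                 i += 1
--             continue
--         if ch == ',':
--             j = i + 1
--             while j < len(s) and s[j] in ' \t\n\r':
--                 j += 1
--             if j < len(s) and s[j] in ']})':
--                 i += 1
--                 continue
--         result.append(ch)
--         i += 1
--     return ''.join(result)
-- ===== SOURCE B (Python) =====
-- def strip_json5(s: str) -> str:
--     """Remove // line comments and trailing commas from JSON5 input.
--
--     Single forward pass as a pure character state machine: instead of
--     scanning ahead after a comma (or peeking at the next character after
--     '/'), it defers the decision: a pending comma and the whitespace after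
--     it are buffered and flushed (or the comma dropped) when the next
--     significant character arrives; a lone '/' is held until the next
--     character decides whether a comment starts.
--     """
--     out = []
--     in_string = False
--     escaped = False
--     in_comment = False
--     slash_held = False
--     pending = False
--     buf = []
--     for ch in s:
--         if in_comment:
--             if ch == '\n':
--                 in_comment = False
--                 out.append(ch)
--             continue
--         if slash_held:
--             slash_held = False
--             if ch == '/':
--                 in_comment = True
--                 continue
--             out.append('/')
--             # fall through: process ch normally
--         if escaped:
--             out.append(ch)
--             escaped = False
--             continue
--         if in_string:
--             if ch == '\\':
--                 escaped = True
--             elif ch == '"':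
--                 in_string = False
--             out.append(ch)
--             continue
--         if pending:
--             if ch in ' \t\n\r':
--                 buf.append(ch)
--                 continue
--             pending = False
--             if ch in ']})':
--                 out.extend(buf)
--                 out.append(ch)
--                 buf = []
--                 continue
--             out.append(',')
--             out.extend(buf)
--             buf = []
--             # fall through: process ch normally
--         if ch == '"':
--             in_string = True
--             out.append(ch)
--             continue
--         if ch == '/':
--             slash_held = True
--             continue
--         if ch == ',':
--             pending = True
--             continue
--         out.append(ch)
--     if slash_held:
--         out.append('/')
--     if pending:
--         out.append(',')
--         out.extend(buf)
--     return ''.join(out)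
-- ===== Notes on version B (the rewrite author's own statement) =====
-- stated objective: faster
-- what changed: Replaced A's two inner lookahead scans (the whitespace re-scan after each comma and the next-character comment peek) with a deferred-state single pass: a pending comma with a whitespace buffer is flushed or dropped when the next significant character arrives, a lone slash is held one step, and comment skipping becomes an in_comment flag.
import Mathlib
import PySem

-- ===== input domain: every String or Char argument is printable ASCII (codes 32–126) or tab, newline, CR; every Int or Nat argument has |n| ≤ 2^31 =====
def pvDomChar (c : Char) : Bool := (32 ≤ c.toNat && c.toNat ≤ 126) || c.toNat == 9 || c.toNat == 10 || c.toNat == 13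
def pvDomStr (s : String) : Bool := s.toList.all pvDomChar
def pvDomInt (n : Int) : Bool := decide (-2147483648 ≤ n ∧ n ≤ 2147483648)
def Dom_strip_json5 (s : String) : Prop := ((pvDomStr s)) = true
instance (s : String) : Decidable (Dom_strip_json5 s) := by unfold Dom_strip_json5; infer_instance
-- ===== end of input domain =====

-- B replaces A's two inner lookahead scans (whitespace-after-comma, the s[i+1] peek after '/')
-- by deferred state in one pass (pending comma + whitespace buffer, held slash, in_comment flag);
-- objective: alternative decomposition, same O(n) cost.

-- ===== PORT A =====
-- A's inner comment loop: `while i < len(s) and s[i] != '\n': i += 1` (skip up to, not past, '\n')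
def aSkip : List Char → List Char
  | [] => []
  | c :: cs => if c = '\n' then c :: cs else aSkip cs

-- needed by aRun's termination: the comment loop never moves i backwards
theorem aSkip_length : ∀ l : List Char, (aSkip l).length ≤ l.length
  | [] => le_refl _
  | c :: cs => by
      rw [aSkip]; split
      · exact le_refl _
      · exact le_trans (aSkip_length cs) (Nat.le_succ _)

-- A's comma lookahead: `j = i+1; while j < len(s) and s[j] in ' \t\n\r': j += 1; j < len(s) and s[j] in ']})'`
def aLook : List Char → Bool
  | [] => false
  | c :: cs =>
      if c = ' ' ∨ c = '\t' ∨ c = '\n' ∨ c = '\r' then aLook cs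
      else decide (c = ']' ∨ c = '}' ∨ c = ')')

def aRun : List Char → Bool → Bool → List Char
  | [], _, _ => []
  | c :: cs, inStr, esc =>
    if esc then c :: aRun cs inStr false
    else if inStr then
      if c = '\\' then c :: aRun cs inStr true
      else if c = '"' then c :: aRun cs false false
      else c :: aRun cs inStr false
    else if c = '"' then c :: aRun cs true false
    else if h : c = '/' ∧ cs.head? = some '/' then aRun (aSkip (c :: cs)) inStr esc
    else if c = ',' ∧ aLook cs then aRun cs inStr esc
    else c :: aRun cs inStr esc
termination_by l _ _ => l.length
decreasing_by
  all_goals simp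
  rw [h.1, aSkip, if_neg (by decide)]
  exact aSkip_length cs

def strip_json5 (s : String) : String := String.ofList (aRun s.toList false false)

-- ===== PORT B =====
def bRun : List Char → Bool → Bool → Bool → Bool → Bool → List Char → List Char
  | [], _, _, _, sh, pend, buf =>
      (if sh then ['/'] else []) ++ (if pend then ',' :: buf else [])
  | c :: cs, inStr, esc, inC, sh, pend, buf =>
    if inC then
      if c = '\n' then c :: bRun cs inStr esc false sh pend buf
      else bRun cs inStr esc true sh pend buf
    else if sh then
      if c = '/' then bRun cs inStr esc true false pend buf
      else '/' :: bRun (c :: cs) inStr esc false false pend buf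
    else if esc then c :: bRun cs inStr false inC sh pend buf
    else if inStr then
      if c = '\\' then c :: bRun cs inStr true inC sh pend buf
      else if c = '"' then c :: bRun cs false esc inC sh pend buf
      else c :: bRun cs inStr esc inC sh pend buf
    else if pend then
      if c = ' ' ∨ c = '\t' ∨ c = '\n' ∨ c = '\r' then
        bRun cs inStr esc inC sh pend (buf ++ [c])
      else if c = ']' ∨ c = '}' ∨ c = ')' then
        buf ++ c :: bRun cs inStr esc inC sh false []
      else ',' :: (buf ++ bRun (c :: cs) inStr esc inC sh false [])
    else if c = '"' then c :: bRun cs true esc inC sh pend buf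
    else if c = '/' then bRun cs inStr esc inC true pend buf
    else if c = ',' then bRun cs inStr esc inC sh true buf
    else c :: bRun cs inStr esc inC sh pend buf
termination_by l _ _ _ sh pend _ =>
  (l.length, (if sh then 1 else 0) + (if pend then 1 else 0))

def strip_json5_alt (s : String) : String :=
  String.ofList (bRun s.toList false false false false false [])

-- ===== PRECONDITION & SPEC =====
def Spec_strip_json5 (s : String) (out : String) : Prop := out = strip_json5_alt s
instance (s : String) (out : String) : Decidable (Spec_strip_json5 s out) := by unfold Spec_strip_json5; infer_instance

-- ===== CLAIM (what is proved, stated in full; the proofs are below) =====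
def Claim_equal_strip_json5 : Prop := ∀ (s : String), Dom_strip_json5 s → Spec_strip_json5 s (strip_json5 s)

-- ===== LEMMAS AND PROOFS =====

theorem pvKey : ∀ (n : Nat) (l : List Char), l.length ≤ n →
    (∀ inStr esc, aRun l inStr esc = bRun l inStr esc false false false []) ∧
    (bRun l false false true false false [] = aRun (aSkip l) false false) ∧
    (∀ buf, bRun l false false false false true buf =
        if aLook l then buf ++ aRun l false false else ',' :: (buf ++ aRun l false false)) ∧
    (bRun l false false false true false [] =
        if l.head? = some '/' then aRun (aSkip l) false false else '/' :: aRun l false false) := by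
  intro n
  induction n with
  | zero =>
    intro l hl
    have hnil : l = [] := List.eq_nil_of_length_eq_zero (Nat.le_zero.mp hl)
    subst hnil
    refine ⟨?_, ?_, ?_, ?_⟩ <;> intros <;> simp [aRun, bRun, aSkip, aLook]
  | succ n ih =>
    intro l hl
    match l with
    | [] =>
      refine ⟨?_, ?_, ?_, ?_⟩ <;> intros <;> simp [aRun, bRun, aSkip, aLook]
    | c :: cs =>
      have hlen : cs.length ≤ n := by simpa using Nat.lt_succ_iff.mp (Nat.lt_of_lt_of_le (by simp) hl)
      obtain ⟨ihN, ihC, ihP, ihS⟩ := ih cs hlen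
      have hN : ∀ inStr esc, aRun (c :: cs) inStr esc = bRun (c :: cs) inStr esc false false false [] := by
        intro inStr esc
        match esc, inStr with
        | true, inStr => simp [aRun, bRun, ihN]
        | false, true =>
          by_cases hb : c = '\\'
          · simp [aRun, bRun, hb, ihN]
          · by_cases hq : c = '"'
            · simp [aRun, bRun, hq, ihN]
            · simp [aRun, bRun, hb, hq, ihN]
        | false, false =>
          by_cases hq : c = '"'
          · simp [aRun, bRun, hq, ihN]
          · by_cases hs : c = '/'
            · subst hs
              cases cs with
              | nil => simp [aRun, bRun, aLook]
              | cons d ds =>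
                by_cases hd : d = '/'
                · subst hd
                  simp [aRun, bRun, aSkip, ihS]
                · simp [aRun, bRun, hd, ihS]
            · by_cases hc : c = ','
              · subst hc
                simp [aRun, bRun, ihP]
              · simp [aRun, bRun, hq, hs, hc, ihN]
      have hC : bRun (c :: cs) false false true false false [] = aRun (aSkip (c :: cs)) false false := by
        by_cases hnl : c = '\n'
        · subst hnl
          simp [bRun, aSkip, aRun, ihN]
        · simp [bRun, aSkip, hnl, ihC]
      have hP : ∀ buf, bRun (c :: cs) false false false false true buf =
          if aLook (c :: cs) then buf ++ aRun (c :: cs) false false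
          else ',' :: (buf ++ aRun (c :: cs) false false) := by
        intro buf
        by_cases hws : c = ' ' ∨ c = '\t' ∨ c = '\n' ∨ c = '\r'
        · have h1 : c ≠ '"' ∧ c ≠ '/' ∧ c ≠ ',' := by
            rcases hws with h | h | h | h <;> subst h <;> exact ⟨by decide, by decide, by decide⟩
          simp [bRun, aRun, aLook, hws, h1.1, h1.2.1, h1.2.2, ihP]
        · by_cases hcl : c = ']' ∨ c = '}' ∨ c = ')'
          · have h1 : c ≠ '"' ∧ c ≠ '/' ∧ c ≠ ',' := by
              rcases hcl with h | h | h <;> subst h <;> exact ⟨by decide, by decide, by decide⟩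
            simp [bRun, aRun, aLook, hws, hcl, h1.1, h1.2.1, h1.2.2, ihN]
          · simp [bRun, aLook, hws, hcl, hN]
      have hS : bRun (c :: cs) false false false true false [] =
          if (c :: cs).head? = some '/' then aRun (aSkip (c :: cs)) false false
          else '/' :: aRun (c :: cs) false false := by
        by_cases hs : c = '/'
        · subst hs
          simp [bRun, aSkip, ihC]
        · simp [bRun, hs, hN]
      exact ⟨hN, hC, hP, hS⟩

-- ===== VERDICT (by name: the statement is the Claim_ definition above) =====
theorem strip_json5_spec : Claim_equal_strip_json5 := by
  intro s _
  unfold Spec_strip_json5 strip_json5 strip_json5_alt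
  exact congrArg String.ofList (((pvKey s.toList.length s.toList (le_refl _)).1) false false)
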